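-- pv_equiv track=rewrite | github.com/mohamadsajjadi/Python-for-Progress- | Basics/tamrin dorei/tamrin dorei 2.py | complicated_calculation
-- ===== SOURCE A (Python) =====
-- def simple_calculations(ls):
--     sum = 0
--     for i in range(0, len(ls), 2):
--         sum += ls[i]
--     sum_2 = 0
--     for j in range(1, len(ls), 2):
--         sum_2 += ls[j]
--     result = sum - sum_2
--     return result
--
-- def complicated_calculation(m, ls):
--     my_list = []
--     first_list = ls[:m]
--     my_list.append(first_list)
--     for i in range(m, len(ls)):
--         if i % m == 0:
--             lst = ls[i:i + m]
--             my_list.append(lst)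
--     last_list = []
--     for item in my_list:
--         last_list.append(sum(item))
--     return simple_calculations(last_list)
-- ===== SOURCE B (Python) =====
-- def complicated_calculation(m, ls):
--     if not ls:
--         return 0
--     return sum(ls[:m]) - complicated_calculation(m, ls[m:])
-- ===== Notes on version B (the rewrite author's own statement) =====
-- stated objective: simpler
-- what changed: A materialises a list of chunks via an index loop with a modulo test, then a list of chunk sums, then subtracts odd-indexed from even-indexed sums with two strided index loops; B is a three-line recursion: sum(ls[:m]) minus the same computation on ls[m:], with no intermediate lists or index bookkeeping.
-- outside the precondition, e.g. on complicated_calculation(-2, [1, 2, 3]): A returns 2, B raises RecursionError; on complicated_calculation(0, [1]): A raises ZeroDivisionError, B raises RecursionError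
import Mathlib
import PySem

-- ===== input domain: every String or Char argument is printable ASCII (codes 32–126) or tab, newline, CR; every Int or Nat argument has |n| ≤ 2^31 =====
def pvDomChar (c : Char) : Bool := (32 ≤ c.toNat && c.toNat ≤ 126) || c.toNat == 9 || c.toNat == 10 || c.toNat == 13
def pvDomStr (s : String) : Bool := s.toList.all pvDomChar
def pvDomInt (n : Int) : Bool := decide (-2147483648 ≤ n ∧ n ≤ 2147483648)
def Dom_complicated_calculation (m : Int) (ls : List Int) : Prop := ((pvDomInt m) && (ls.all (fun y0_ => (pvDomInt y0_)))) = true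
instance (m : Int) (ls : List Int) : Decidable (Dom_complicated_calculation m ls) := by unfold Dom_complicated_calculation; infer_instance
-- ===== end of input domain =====

-- B replaces A's chunk-list + chunk-sum-list + even/odd index subtraction by a direct
-- three-line recursion sum(ls[:m]) - f(ls[m:]); objective: simpler.


-- ===== PORT A =====
def simple_calculations (ls : List Int) : Int :=
  -- the indices produced by the two ranges are always in range, so pyGetD's default is unreachable
  let sum1 := (PySem.List.pyRange 0 (ls.length : Int) 2).foldl
    (fun acc i => acc + PySem.List.pyGetD ls i 0) 0
  let sum2 := (PySem.List.pyRange 1 (ls.length : Int) 2).foldl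
    (fun acc j => acc + PySem.List.pyGetD ls j 0) 0
  sum1 - sum2

def complicated_calculation (m : Int) (ls : List Int) : Int :=
  let my_list : List (List Int) := [PySem.List.slice ls none (some m)]
  let my_list := (PySem.List.pyRange m (ls.length : Int) 1).foldl
    (fun acc i => if PySem.Int.mod i m == 0
                  then acc ++ [PySem.List.slice ls (some i) (some (i + m))]
                  else acc) my_list
  let last_list := my_list.foldl (fun acc item => acc ++ [item.sum]) ([] : List Int)
  simple_calculations last_list

-- ===== PORT B =====
-- fuel = ls.length; for m ≥ 1 each recursive call strictly shrinks the list, so the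
-- fuel-exhaustion branch is unreachable on Pre_ (it mirrors Python's RecursionError for m ≤ 0)
def ccAltGo (m : Int) : Nat → List Int → Int
  | _, [] => 0
  | 0, _ => 0
  | fuel + 1, ls =>
      (PySem.List.slice ls none (some m)).sum - ccAltGo m fuel (PySem.List.slice ls (some m) none)

def complicated_calculation_alt (m : Int) (ls : List Int) : Int :=
  ccAltGo m ls.length ls

-- ===== PRECONDITION & SPEC =====
-- Pre_ excludes m ≤ 0 with nonempty ls: there A raises ZeroDivisionError for m = 0, and for
-- negative m A returns an accidental value of its slice/modulo chunking while B's natural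
-- recursion never terminates (RecursionError).
def Pre_complicated_calculation (m : Int) (ls : List Int) : Prop := 1 ≤ m ∨ ls = []
instance (m : Int) (ls : List Int) : Decidable (Pre_complicated_calculation m ls) := by
  unfold Pre_complicated_calculation; infer_instance
def pvWitness_complicated_calculation : Int × List Int := (2, [1, 2, 3, 4, 5])

def Spec_complicated_calculation (m : Int) (ls : List Int) (out : Int) : Prop := out = complicated_calculation_alt m ls
instance (m : Int) (ls : List Int) (out : Int) : Decidable (Spec_complicated_calculation m ls out) := by unfold Spec_complicated_calculation; infer_instance

-- ===== CLAIM (what is proved, stated in full; the proofs are below) =====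
def Claim_equal_complicated_calculation : Prop := ∀ (m : Int) (ls : List Int), Dom_complicated_calculation m ls → Pre_complicated_calculation m ls → Spec_complicated_calculation m ls (complicated_calculation m ls)

-- ===== LEMMAS AND PROOFS =====

-- alternating sum a₀ - a₁ + a₂ - …
def altSum : List Int → Int
  | [] => 0
  | a :: t => a - altSum t

-- the chunks t[k:k+M] at every multiple k of M below len(t), including k = 0
def tailChunks (M : Nat) (t : List Int) : List (List Int) :=
  ((List.range t.length).filter (fun k => decide (M ∣ k))).map (fun k => (t.drop k).take M)

theorem filter_dvd_range (M n : Nat) (hM : 1 ≤ M) (hn : 1 ≤ n) :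
    (List.range n).filter (fun k => decide (M ∣ k)) =
      0 :: ((List.range (n - M)).filter (fun k => decide (M ∣ k))).map (· + M) := by
  have hfM : ∀ m' ≤ M, (List.range m').filter (fun k => decide (M ∣ k)) = if m' = 0 then [] else [0] := by
    intro m' hm'
    cases m' with
    | zero => simp
    | succ m'' =>
      rw [List.range_succ_eq_map, List.filter_cons_of_pos (by simp), List.filter_map]
      rw [List.filter_congr (q := fun _ => false)
        (by intro k hk
            simp only [List.mem_range] at hk
            simp only [Function.comp, decide_eq_false_iff_not]
            intro hdvd
            have := Nat.le_of_dvd (by omega) hdvd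
            omega)]
      simp
  by_cases hnM : n ≤ M
  · rw [hfM n (by omega), if_neg (by omega)]
    have : n - M = 0 := by omega
    simp [this]
  · obtain ⟨d, rfl⟩ : ∃ d, n = M + d := ⟨n - M, by omega⟩
    rw [List.range_add, List.filter_append, hfM M le_rfl, if_neg (by omega)]
    rw [List.filter_map, List.filter_congr (q := (fun k => decide (M ∣ k)))
      (by intro k hk
          simp only [Function.comp]
          congr 1
          simp)]
    simp only [List.cons_append, List.nil_append, Nat.add_sub_cancel_left]
    congr 1
    apply List.map_congr_left; intro k hk; simp [Nat.add_comm]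

theorem tailChunks_cons (M : Nat) (t : List Int) (hM : 1 ≤ M) (ht : t ≠ []) :
    tailChunks M t = t.take M :: tailChunks M (t.drop M) := by
  unfold tailChunks
  rw [filter_dvd_range M t.length hM (by cases t <;> simp_all)]
  simp only [List.map_cons, List.map_map, List.drop_zero, List.length_drop]
  congr 1
  apply List.map_congr_left
  intro k hk
  simp [Function.comp, List.drop_drop, Nat.add_comm]

-- the chunk list A builds: first slice plus the slices appended at the multiples of m
theorem myList_eq (M : Nat) (ls : List Int) (hM : 1 ≤ M) :
    ([PySem.List.slice ls none (some (M : Int))] ++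
      ((PySem.List.pyRange (M : Int) (ls.length : Int) 1).filter
        (fun i => PySem.Int.mod i (M : Int) == 0)).map
        (fun i => PySem.List.slice ls (some i) (some (i + (M : Int))))) =
      ls.take M :: tailChunks M (ls.drop M) := by
  rw [PySem.List.slice_to ls (by positivity)]
  have htn : ((M : Int)).toNat = M := by simp
  rw [htn, List.singleton_append]
  congr 1
  rw [PySem.List.pyRange_one, List.filter_map, List.map_map]
  have hlen : (((ls.length : Int)) - (M : Int)).toNat = ls.length - M := by omega
  rw [hlen]
  unfold tailChunks
  rw [List.length_drop]
  rw [List.filter_congr (q := fun k => decide (M ∣ k))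
    (by intro k hk
        simp only [Function.comp_apply]
        rw [Bool.eq_iff_iff]
        simp only [beq_iff_eq, decide_eq_true_eq, PySem.Int.mod_eq_zero_iff_dvd]
        rw [dvd_add_right (dvd_refl _), Int.natCast_dvd_natCast])]
  apply List.map_congr_left
  intro k hk
  simp only [Function.comp]
  have h1 : (M : Int) + (k : Int) = ((M + k : Nat) : Int) := by push_cast; ring
  rw [h1, PySem.List.slice_natCast_add, List.drop_drop]

-- even-index sum, as A's ported strided loops compute it
def esum (l : List Int) : Int :=
  ((List.range ((l.length + 1) / 2)).map (fun k => l.getD (2 * k) 0)).sum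

theorem getD_two_succ (t : List Int) (k : Nat) :
    t.getD (2 * k + 1) 0 = t.tail.getD (2 * k) 0 := by
  cases t <;> simp [List.getD]

theorem esum_cons (a : Int) (t : List Int) : esum (a :: t) = a + esum t.tail := by
  unfold esum
  have hq : ((a :: t).length + 1) / 2 = (t.tail.length + 1) / 2 + 1 := by
    cases t with
    | nil => simp
    | cons b t' => simp only [List.tail_cons, List.length_cons]; omega
  rw [hq, List.range_succ_eq_map, List.map_cons, List.sum_cons, List.map_map]
  simp only [Nat.mul_zero, List.getD_cons_zero]
  congr 1
  apply congrArg List.sum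
  apply List.map_congr_left
  intro k hk
  simp only [Function.comp_apply, Nat.succ_eq_add_one]
  have : 2 * (k + 1) = 2 * k + 1 + 1 := by omega
  rw [this, List.getD_cons_succ, getD_two_succ]

theorem simple_calculations_eq (l : List Int) :
    simple_calculations l = esum l - esum l.tail := by
  unfold simple_calculations
  rw [PySem.List.pyRange_of_pos 0 (l.length : Int) (by norm_num),
      PySem.List.pyRange_of_pos 1 (l.length : Int) (by norm_num)]
  rw [PySem.List.foldl_add, PySem.List.foldl_add]
  simp only [List.map_map, zero_add]
  have h1 : (if (0:Int) < (l.length : Int) then (((l.length : Int) - 0 + 2 - 1) / 2).toNat else 0) = (l.length + 1) / 2 := by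
    by_cases h : (0:Int) < (l.length : Int)
    · rw [if_pos h]; omega
    · rw [if_neg h]; omega
  have h2 : (if (1:Int) < (l.length : Int) then (((l.length : Int) - 1 + 2 - 1) / 2).toNat else 0) = (l.tail.length + 1) / 2 := by
    have ht : l.tail.length = l.length - 1 := by cases l <;> simp
    by_cases h : (1:Int) < (l.length : Int)
    · rw [if_pos h]; omega
    · rw [if_neg h]; omega
  rw [h1, h2]
  congr 1
  · apply congrArg List.sum
    apply List.map_congr_left
    intro k hk
    simp only [Function.comp_apply]
    have : (2 : Int) * (k : Int) = ((2 * k : Nat) : Int) := by push_cast; ring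
    rw [this, PySem.List.pyGetD_natCast]
  · apply congrArg List.sum
    apply List.map_congr_left
    intro k hk
    simp only [Function.comp_apply]
    have : (1 : Int) + 2 * (k : Int) = ((2 * k + 1 : Nat) : Int) := by push_cast; ring
    rw [this, PySem.List.pyGetD_natCast, getD_two_succ]

theorem simple_calculations_altSum (l : List Int) : simple_calculations l = altSum l := by
  induction l with
  | nil => simp [simple_calculations_eq, esum, altSum]
  | cons a t ih =>
      rw [simple_calculations_eq, esum_cons, List.tail_cons, altSum, ← ih,
        simple_calculations_eq]
      ring

theorem ccAltGo_eq (M : Nat) (hM : 1 ≤ M) :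
    ∀ (fuel : Nat) (t : List Int), t.length ≤ fuel →
      ccAltGo (M : Int) fuel t = altSum ((tailChunks M t).map List.sum) := by
  intro fuel
  induction fuel with
  | zero =>
      intro t ht
      have : t = [] := by cases t <;> simp_all
      subst this
      simp [ccAltGo, tailChunks, altSum]
  | succ f ih =>
      intro t ht
      cases t with
      | nil => simp [ccAltGo, tailChunks, altSum]
      | cons a t' =>
          have hgo : ccAltGo (M : Int) (f + 1) (a :: t') =
              (PySem.List.slice (a :: t') none (some (M : Int))).sum -
                ccAltGo (M : Int) f (PySem.List.slice (a :: t') (some (M : Int)) none) := rfl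
          rw [hgo, PySem.List.slice_to _ (by positivity), PySem.List.slice_from _ (by positivity)]
          have htn : ((M : Int)).toNat = M := by simp
          rw [htn, tailChunks_cons M (a :: t') hM (by simp), List.map_cons, altSum]
          rw [ih ((a :: t').drop M) (by simp only [List.length_drop, List.length_cons] at *; omega)]

theorem altSum_zero (l : List Int) (h : ∀ x ∈ l, x = (0 : Int)) : altSum l = 0 := by
  induction l with
  | nil => rfl
  | cons a t ih =>
      rw [altSum, h a (by simp), ih (fun x hx => h x (by simp [hx]))]
      ring

theorem slice_nil (a b : Option Int) : PySem.List.slice ([] : List Int) a b = [] := by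
  cases hsl : PySem.List.slice ([] : List Int) a b with
  | nil => rfl
  | cons y ys =>
      have hy : y ∈ PySem.List.slice ([] : List Int) a b := by rw [hsl]; simp
      exact absurd (PySem.List.mem_of_mem_slice ([] : List Int) a b hy) (by simp)

-- both programs return 0 on the empty list, for every m
theorem main_nil (m : Int) : complicated_calculation m [] = 0 := by
  simp only [complicated_calculation]
  rw [PySem.List.foldl_append_if, PySem.List.foldl_append_singleton_eq_map,
    simple_calculations_altSum]
  apply altSum_zero
  intro x hx
  simp only [List.nil_append, List.map_map, List.singleton_append, List.map_cons,
    List.mem_cons, List.mem_map] at hx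
  rcases hx with h | ⟨i, _, h⟩
  · rw [h, slice_nil]; rfl
  · rw [← h]; simp only [Function.comp_apply, slice_nil]; rfl

theorem main_pos (M : Nat) (ls : List Int) (hM : 1 ≤ M) :
    complicated_calculation (M : Int) ls = complicated_calculation_alt (M : Int) ls := by
  simp only [complicated_calculation, complicated_calculation_alt]
  rw [PySem.List.foldl_append_if, PySem.List.foldl_append_singleton_eq_map,
    simple_calculations_altSum, List.nil_append]
  rw [myList_eq M ls hM]
  rw [ccAltGo_eq M hM ls.length ls le_rfl]
  cases hls : ls with
  | nil =>
      simp [tailChunks, altSum]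
  | cons a t =>
      rw [← hls, tailChunks_cons M ls hM (by rw [hls]; simp)]

-- ===== VERDICT (by name: the statement is the Claim_ definition above) =====
theorem complicated_calculation_spec : Claim_equal_complicated_calculation := by
  intro m ls _hdom hpre
  unfold Spec_complicated_calculation
  rcases hpre with hm | hls
  · obtain ⟨M, rfl⟩ : ∃ M : Nat, m = (M : Int) := ⟨m.toNat, by omega⟩
    exact main_pos M ls (by exact_mod_cast hm)
  · subst hls
    rw [main_nil m]
    rfl
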